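-- pv_equiv track=rewrite | github.com/Aasthaengg/IBMdataset | Python_codes/p02632/s510422236.py | comb_mod
-- ===== SOURCE A (Python) =====
-- def comb_mod(n,r,mod):
--     ans = 1
--     lis = []
--     for i in range(r):
--         ans *= n+i
--         ans *= pow(i+1,mod-2,mod)
--         ans %= mod
--         lis.append(ans)
--     return lis
-- ===== SOURCE B (Python) =====
-- def comb_mod(n, r, mod):
--     nums = []
--     p = 1
--     for i in range(r):
--         p = p * (n + i) % mod
--         nums.append(p)
--     facts = []
--     q = 1
--     for i in range(r):
--         q = q * (i + 1) % mod
--         facts.append(q)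
--     return [a * pow(b, mod - 2, mod) % mod for a, b in zip(nums, facts)]
-- ===== Notes on version B (the rewrite author's own statement) =====
-- stated objective: alternative
-- what changed: B replaces A's single running accumulator (multiply by n+i and by pow(i+1,mod-2,mod) each step) with two separate prefix-product passes (numerators and factorials mod m) followed by a zip-map that inverts the whole factorial with one pow per element, using (prod k)^e = prod k^e (mod m).
-- outside the precondition, e.g. on comb_mod(5, 2, -9): A returns [-4, -3], B returns [-4, -3]
import Mathlib
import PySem

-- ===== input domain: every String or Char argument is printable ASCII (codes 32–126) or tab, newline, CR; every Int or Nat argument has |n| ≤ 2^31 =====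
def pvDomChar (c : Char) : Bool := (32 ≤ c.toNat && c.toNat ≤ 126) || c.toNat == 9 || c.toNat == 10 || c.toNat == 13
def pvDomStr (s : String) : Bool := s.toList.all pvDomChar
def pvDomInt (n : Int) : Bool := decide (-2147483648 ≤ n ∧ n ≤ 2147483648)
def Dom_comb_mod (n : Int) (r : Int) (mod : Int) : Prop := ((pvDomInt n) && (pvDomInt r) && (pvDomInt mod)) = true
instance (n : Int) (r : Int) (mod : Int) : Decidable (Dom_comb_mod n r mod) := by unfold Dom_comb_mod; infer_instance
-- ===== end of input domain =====

-- B keeps the same cost but a different structure: two prefix-product passes plus a zip-map with one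
-- pow of the whole factorial per element, instead of A's single fused accumulator loop.

-- ===== PORT A =====
-- Python's pow(b, e, m): exact for e ≥ 0 and any m ≠ 0; for e < 0 it is exact on the inputs Pre_ admits
-- (inside Pre_ a negative exponent only occurs at m = 1, where Python returns 0).
def pvPowModNat (b : Int) (k : Nat) (m : Int) : Int :=
  if h : k = 0 then PySem.Int.mod 1 m
  else
    let t := pvPowModNat b (k / 2) m
    if k % 2 = 0 then PySem.Int.mod (t * t) m else PySem.Int.mod (t * t * b) m
decreasing_by exact Nat.div_lt_self (Nat.pos_of_ne_zero h) (by omega)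

def pvPowMod (b e m : Int) : Int := if 0 ≤ e then pvPowModNat b e.toNat m else 0

def pvStepA (n m : Int) (st : Int × List Int) (i : Int) : Int × List Int :=
  let ans := PySem.Int.mod (st.1 * (n + i) * pvPowMod (i + 1) (m - 2) m) m
  (ans, st.2 ++ [ans])

def comb_mod (n : Int) (r : Int) (mod : Int) : List Int :=
  ((PySem.List.pyRange 0 r 1).foldl (pvStepA n mod) (1, [])).2

-- ===== PORT B =====
def pvStepNum (n m : Int) (st : Int × List Int) (i : Int) : Int × List Int :=
  let p := PySem.Int.mod (st.1 * (n + i)) m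
  (p, st.2 ++ [p])

def pvStepFact (m : Int) (st : Int × List Int) (i : Int) : Int × List Int :=
  let q := PySem.Int.mod (st.1 * (i + 1)) m
  (q, st.2 ++ [q])

def pvCombElem (m : Int) (ab : Int × Int) : Int :=
  PySem.Int.mod (ab.1 * pvPowMod ab.2 (m - 2) m) m

def comb_mod_alt (n : Int) (r : Int) (mod : Int) : List Int :=
  let nums := ((PySem.List.pyRange 0 r 1).foldl (pvStepNum n mod) (1, [])).2
  let facts := ((PySem.List.pyRange 0 r 1).foldl (pvStepFact mod) (1, [])).2
  (nums.zip facts).map (pvCombElem mod)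

-- ===== PRECONDITION & SPEC =====
-- Pre_ restricts mod (when the loop runs, r > 0) to the natural domain of a positive modulus:
-- outside it Python's pow has a negative exponent and raises ValueError for mod = 0 and whenever
-- some step i+1 shares a factor with mod; on the remaining (coprime) negative moduli A does return
-- and B returns the same list, but those inverse-mod-negative-modulus values are outside the
-- function's natural domain and are excluded with it.
def Pre_comb_mod (n : Int) (r : Int) (mod : Int) : Prop := r ≤ 0 ∨ 1 ≤ mod
instance (n : Int) (r : Int) (mod : Int) : Decidable (Pre_comb_mod n r mod) := by unfold Pre_comb_mod; infer_instance

def pvWitness_comb_mod : Int × Int × Int := (10, 3, 7)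

def Spec_comb_mod (n : Int) (r : Int) (mod : Int) (out : List Int) : Prop := out = comb_mod_alt n r mod
instance (n : Int) (r : Int) (mod : Int) (out : List Int) : Decidable (Spec_comb_mod n r mod out) := by unfold Spec_comb_mod; infer_instance

-- ===== CLAIM (what is proved, stated in full; the proofs are below) =====
def Claim_equal_comb_mod : Prop := ∀ (n : Int) (r : Int) (mod : Int), Dom_comb_mod n r mod → Pre_comb_mod n r mod → Spec_comb_mod n r mod (comb_mod n r mod)

-- ===== LEMMAS AND PROOFS =====

lemma pv_emod_mul_left (x y m : Int) : (x % m * y) % m = (x * y) % m := by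
  rw [Int.mul_emod, Int.emod_emod_of_dvd _ dvd_rfl, ← Int.mul_emod]

lemma pv_emod_mul_right (x y m : Int) : (x * (y % m)) % m = (x * y) % m := by
  rw [Int.mul_emod, Int.emod_emod_of_dvd _ dvd_rfl, ← Int.mul_emod]

lemma pv_pow_emod (t : Int) (k : Nat) (m : Int) : (t % m) ^ k % m = t ^ k % m := by
  induction k with
  | zero => simp
  | succ k ih =>
    rw [pow_succ, pow_succ, Int.mul_emod, ih, Int.emod_emod_of_dvd _ dvd_rfl, ← Int.mul_emod]

lemma pvPowModNat_eq (b m : Int) (hm : 0 < m) : ∀ k : Nat, pvPowModNat b k m = b ^ k % m := by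
  intro k
  induction k using Nat.strong_induction_on with
  | _ k ih =>
    unfold pvPowModNat
    split_ifs with h0 h2
    · subst h0
      rw [PySem.Int.mod_eq_emod_of_pos hm]
      norm_num
    · have hlt := Nat.div_lt_self (Nat.pos_of_ne_zero h0) (by norm_num : (1:Nat) < 2)
      rw [ih _ hlt, PySem.Int.mod_eq_emod_of_pos hm]
      have hx : Int.ModEq m (b ^ (k / 2) % m) (b ^ (k / 2)) := Int.emod_emod_of_dvd _ dvd_rfl
      calc (b ^ (k / 2) % m * (b ^ (k / 2) % m)) % m
          = (b ^ (k / 2) * b ^ (k / 2)) % m := hx.mul hx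
        _ = b ^ k % m := by
            have hk : k / 2 + k / 2 = k := by omega
            rw [← pow_add, hk]
    · have hlt := Nat.div_lt_self (Nat.pos_of_ne_zero h0) (by norm_num : (1:Nat) < 2)
      rw [ih _ hlt, PySem.Int.mod_eq_emod_of_pos hm]
      have hx : Int.ModEq m (b ^ (k / 2) % m) (b ^ (k / 2)) := Int.emod_emod_of_dvd _ dvd_rfl
      calc (b ^ (k / 2) % m * (b ^ (k / 2) % m) * b) % m
          = (b ^ (k / 2) * b ^ (k / 2) * b) % m := (hx.mul hx).mul (Int.ModEq.refl b)
        _ = b ^ k % m := by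
            have hk : k / 2 + k / 2 + 1 = k := by omega
            rw [← pow_add, ← pow_succ, hk]

lemma pvPowMod_emod (t e m : Int) (hm : 0 < m) : pvPowMod (t % m) e m = pvPowMod t e m := by
  unfold pvPowMod
  split_ifs with h
  · rw [pvPowModNat_eq _ _ hm, pvPowModNat_eq _ _ hm, pv_pow_emod]
  · rfl

lemma pvPowMod_mul (s t e m : Int) (hm : 0 < m) :
    pvPowMod (s * t) e m = (pvPowMod s e m * pvPowMod t e m) % m := by
  unfold pvPowMod
  split_ifs with h
  · rw [pvPowModNat_eq _ _ hm, pvPowModNat_eq _ _ hm, pvPowModNat_eq _ _ hm,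
      mul_pow, Int.mul_emod]
  · simp

lemma pv_step_eq (n m : Int) (hm : 0 < m) (a p q i : Int)
    (hinv : a % m = (p * pvPowMod q (m - 2) m) % m) :
    PySem.Int.mod (a * (n + i) * pvPowMod (i + 1) (m - 2) m) m
      = pvCombElem m (PySem.Int.mod (p * (n + i)) m, PySem.Int.mod (q * (i + 1)) m) := by
  unfold pvCombElem
  simp only [PySem.Int.mod_eq_emod_of_pos hm]
  calc (a * (n + i) * pvPowMod (i + 1) (m - 2) m) % m
      = (a * ((n + i) * pvPowMod (i + 1) (m - 2) m)) % m := by ring_nf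
    _ = (a % m * ((n + i) * pvPowMod (i + 1) (m - 2) m)) % m := (pv_emod_mul_left _ _ _).symm
    _ = ((p * pvPowMod q (m - 2) m) % m * ((n + i) * pvPowMod (i + 1) (m - 2) m)) % m := by rw [hinv]
    _ = ((p * pvPowMod q (m - 2) m) * ((n + i) * pvPowMod (i + 1) (m - 2) m)) % m :=
        pv_emod_mul_left _ _ _
    _ = ((p * (n + i)) * (pvPowMod q (m - 2) m * pvPowMod (i + 1) (m - 2) m)) % m := by ring_nf
    _ = ((p * (n + i)) * ((pvPowMod q (m - 2) m * pvPowMod (i + 1) (m - 2) m) % m)) % m :=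
        (pv_emod_mul_right _ _ _).symm
    _ = ((p * (n + i)) * pvPowMod (q * (i + 1)) (m - 2) m) % m := by
        rw [pvPowMod_mul _ _ _ _ hm]
    _ = ((p * (n + i)) % m * pvPowMod (q * (i + 1)) (m - 2) m) % m :=
        (pv_emod_mul_left _ _ _).symm
    _ = ((p * (n + i)) % m * pvPowMod (q * (i + 1) % m) (m - 2) m) % m := by
        rw [pvPowMod_emod _ _ _ hm]

lemma pv_fold (n m : Int) (hm : 0 < m) (L : List Int) :
    ∀ (a p q : Int) (lis nums facts : List Int),
      nums.length = facts.length →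
      a % m = (p * pvPowMod q (m - 2) m) % m →
      lis = (nums.zip facts).map (pvCombElem m) →
      (L.foldl (pvStepA n m) (a, lis)).2
        = (((L.foldl (pvStepNum n m) (p, nums)).2).zip
            ((L.foldl (pvStepFact m) (q, facts)).2)).map (pvCombElem m) := by
  induction L with
  | nil => intro a p q lis nums facts hlen hinv hlis; simpa using hlis
  | cons i L ih =>
    intro a p q lis nums facts hlen hinv hlis
    simp only [List.foldl_cons, pvStepA, pvStepNum, pvStepFact]
    have hstep := pv_step_eq n m hm a p q i hinv
    apply ih
    · simp [hlen]
    · rw [hstep]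
      unfold pvCombElem
      rw [PySem.Int.mod_eq_emod_of_pos hm, Int.emod_emod_of_dvd _ dvd_rfl]
    · rw [hlis, hstep, List.zip_append hlen]
      simp

theorem pv_main (n r m : Int) (hpre : r ≤ 0 ∨ 1 ≤ m) : comb_mod n r m = comb_mod_alt n r m := by
  unfold comb_mod comb_mod_alt
  rcases hpre with h | h
  · rw [PySem.List.pyRange_one_eq_nil h]
    simp
  · exact pv_fold n m (by omega) _ 1 1 1 [] [] [] rfl
      (by
        unfold pvPowMod
        split_ifs with he
        · rw [pvPowModNat_eq _ _ (by omega), one_pow, one_mul,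
            Int.emod_emod_of_dvd _ dvd_rfl]
        · have hm1 : m = 1 := by omega
          subst hm1
          decide)
      rfl

-- ===== VERDICT (by name: the statement is the Claim_ definition above) =====
theorem comb_mod_spec : Claim_equal_comb_mod := by
  intro n r mod _ hpre
  unfold Spec_comb_mod
  exact pv_main n r mod hpre
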